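-- pv_equiv track=rewrite | github.com/sarvex/python-leetcode | 2931.Maximum Spending After Buying Items.py | maxSpending
-- ===== SOURCE A (Python) =====
-- from typing import List
-- from heapq import heapify, heappop, heappush
--
-- def maxSpending(values: List[List[int]]) -> int:
--     """Greedy approach using min heap to maximize spending
--
--     Intuition:
--     To maximize spending, we should buy items in ascending order of their values.
--     This way, the more expensive items are bought on later days, multiplying them
--     by larger day numbers.
--
--     Approach:
--     1. Create a min heap with the last (largest) value from each shop
--     2. On each day, buy the cheapest available item
--     3. After buying an item, add the next item from the same shop to the heap
--     4. Continue until all items are bought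
--
--     Complexity:
--     Time: O(m*n*log(m)) where m is number of shops and n is items per shop
--     Space: O(m) for the priority queue
--     """
--     # Initialize min heap with the last item from each shop
--     pq = [(row[-1], i, len(row) - 1) for i, row in enumerate(values)]
--     heapify(pq)
--
--     total_spending = 0
--     day = 0
--
--     # Process items in ascending order of value
--     while pq:
--         day += 1
--         value, shop_idx, item_idx = heappop(pq)
--         total_spending += value * day
--
--         # Add the next item from the same shop if available
--         if item_idx > 0:
--             heappush(pq, (values[shop_idx][item_idx - 1], shop_idx, item_idx - 1))
--
--     return total_spending
-- ===== SOURCE B (Python) =====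
-- def maxSpending(values):
--     """Heap-free: keep each shop's remaining items as a reversed list and pick,
--     each day, the smallest current front value (first shop on ties) by a linear scan."""
--     heads = [row[::-1] for row in values]
--     total = 0
--     day = 0
--     while True:
--         best = None
--         for j, h in enumerate(heads):
--             if h and (best is None or h[0] < best[0]):
--                 best = (h[0], j)
--         if best is None:
--             return total
--         day += 1
--         v, j = best
--         total += v * day
--         heads[j] = heads[j][1:]
-- ===== Notes on version B (the rewrite author's own statement) =====
-- stated objective: alternative
-- what changed: B drops the min-heap of (value, shop, index) triples re-fed from the source rows and instead keeps each shop's remaining items as a reversed list, picking each day's purchase by a plain linear argmin scan over the current fronts (first shop on ties); Pre_ only excludes inputs with an empty shop row, on which A raises IndexError at row[-1].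
import Mathlib
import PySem

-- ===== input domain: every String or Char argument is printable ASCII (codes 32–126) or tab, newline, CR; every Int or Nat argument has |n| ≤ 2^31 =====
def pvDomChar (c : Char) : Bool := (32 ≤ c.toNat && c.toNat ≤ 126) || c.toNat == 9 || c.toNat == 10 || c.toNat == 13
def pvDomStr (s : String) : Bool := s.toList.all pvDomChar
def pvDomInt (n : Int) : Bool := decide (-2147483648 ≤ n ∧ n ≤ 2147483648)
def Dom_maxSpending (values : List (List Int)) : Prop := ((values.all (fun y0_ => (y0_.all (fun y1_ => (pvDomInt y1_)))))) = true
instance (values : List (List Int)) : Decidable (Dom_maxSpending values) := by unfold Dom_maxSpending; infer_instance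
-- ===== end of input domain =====

-- B replaces A's min-heap of (value, shop, index) triples, re-fed from the source rows after each
-- pop, by a plain linear argmin scan over per-shop reversed remainders: no heap, no triples.

-- ===== PORT A =====
-- Python tuple comparison (value, shop_idx, item_idx): lexicographic.
def lexLt (a b : Int × Int × Int) : Bool :=
  a.1 < b.1 || (a.1 == b.1 && (a.2.1 < b.2.1 || (a.2.1 == b.2.1 && a.2.2 < b.2.2)))

-- heapq is modelled by its observable contract: heappop returns the smallest tuple
-- (the tuples here are pairwise distinct — shop indices differ — so the pop order is
-- exactly the tuple minimum); the heap is kept as a plain list, heappush appends.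
def heapMin (x : Int × Int × Int) (xs : List (Int × Int × Int)) : Int × Int × Int :=
  xs.foldl (fun m t => if lexLt t m then t else m) x

-- needed by aLoop's termination proof, so it stays above the port
theorem heapMin_mem (x : Int × Int × Int) (xs : List (Int × Int × Int)) :
    heapMin x xs ∈ x :: xs := by
  unfold heapMin
  induction xs generalizing x with
  | nil => simp
  | cons y t ih =>
    simp only [List.foldl_cons]
    by_cases hc : lexLt y x = true
    · have h := ih y
      rw [List.mem_cons] at h
      rcases h with h | h <;> simp [hc, h]
    · have h := ih x
      rw [List.mem_cons] at h
      rcases h with h | h <;> simp [hc, h]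

theorem measure_erase (pq : List (Int × Int × Int)) (m : Int × Int × Int) (hm : m ∈ pq) :
    ((pq.erase m).map (fun t => t.2.2.toNat + 1)).sum + (m.2.2.toNat + 1)
      = (pq.map (fun t => t.2.2.toNat + 1)).sum := by
  have hp : pq.Perm (m :: pq.erase m) := List.perm_cons_erase hm
  have := (hp.map (fun t => t.2.2.toNat + 1)).sum_eq
  simp only [List.map_cons, List.sum_cons] at this
  omega

-- the while-loop of A; day/total as in the Python (day incremented before the pop).
-- PySem.List.pyGetD defaults are reachable only where the Python would raise (excluded by Pre_).
def aLoop (values : List (List Int)) (pq : List (Int × Int × Int)) (total day : Int) : Int :=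
  match pq with
  | [] => total
  | x :: rest =>
    if h : (heapMin x rest).2.2 > 0 then
      aLoop values
        (((x :: rest).erase (heapMin x rest)) ++
          [(PySem.List.pyGetD (PySem.List.pyGetD values (heapMin x rest).2.1 [])
              ((heapMin x rest).2.2 - 1) 0,
            (heapMin x rest).2.1, (heapMin x rest).2.2 - 1)])
        (total + (heapMin x rest).1 * (day + 1)) (day + 1)
    else
      aLoop values ((x :: rest).erase (heapMin x rest))
        (total + (heapMin x rest).1 * (day + 1)) (day + 1)
termination_by (pq.map (fun t => t.2.2.toNat + 1)).sum
decreasing_by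
  all_goals
    have hm := heapMin_mem x rest
    have hme := measure_erase (x :: rest) (heapMin x rest) hm
    simp only [List.map_append, List.sum_append, List.map_cons, List.sum_cons, List.map_nil,
      List.sum_nil] at *
    omega

def maxSpending (values : List (List Int)) : Int :=
  let pq := (PySem.List.enumerate values 0).map
    (fun p => (PySem.List.pyGetD p.2 (-1) 0, p.1, (p.2.length : Int) - 1))
  aLoop values pq 0 0

-- ===== PORT B =====
-- one step of B's inner for-loop: 'if h and (best is None or h[0] < best[0]): best = (h[0], j)'
def bstep (acc : Option (Int × Int)) (p : Int × List Int) : Option (Int × Int) :=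
  match p.2, acc with
  | [], _ => acc
  | hv :: _, none => some (hv, p.1)
  | hv :: _, some (bv, bj) => if hv < bv then some (hv, p.1) else some (bv, bj)

-- B's inner scan: the (value, index) of the smallest current front, first shop on ties
def scanBest (heads : List (List Int)) : Option (Int × Int) :=
  (PySem.List.enumerate heads 0).foldl bstep none

-- the two theorems below are needed by bLoop's termination proof, so they stay above the port
theorem scanBest_aux (heads : List (List Int)) : ∀ (j0 : Int) (acc : Option (Int × Int)) (v j : Int),
    (PySem.List.enumerate heads j0).foldl bstep acc = some (v, j) →
    acc = some (v, j) ∨ ∃ (k : Nat) (hk : k < heads.length), j = j0 + (k : Int) ∧ heads[k] ≠ [] := by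
  induction heads with
  | nil =>
    intro j0 acc v j h
    simp only [PySem.List.enumerate, List.foldl_nil] at h
    exact Or.inl h
  | cons hd tl ih =>
    intro j0 acc v j h
    simp only [PySem.List.enumerate, List.foldl_cons] at h
    rcases ih (j0 + 1) _ v j h with hacc | ⟨k, hk, hj, hne⟩
    · cases hd with
      | nil => exact Or.inl (by simpa [bstep] using hacc)
      | cons a t =>
        cases acc with
        | none =>
          simp only [bstep, Option.some.injEq, Prod.mk.injEq] at hacc
          exact Or.inr ⟨0, by simp, by omega, by simp⟩
        | some b =>
          rcases b with ⟨bv, bj⟩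
          simp only [bstep] at hacc
          split_ifs at hacc
          · simp only [Option.some.injEq, Prod.mk.injEq] at hacc
            exact Or.inr ⟨0, by simp, by omega, by simp⟩
          · exact Or.inl hacc
    · refine Or.inr ⟨k + 1, by simpa using hk, ?_, by simpa using hne⟩
      push_cast
      omega

theorem scanBest_some {heads : List (List Int)} {v j : Int}
    (h : scanBest heads = some (v, j)) :
    ∃ (k : Nat) (hk : k < heads.length), j = (k : Int) ∧ heads[k] ≠ [] := by
  rcases scanBest_aux heads 0 none v j h with hacc | ⟨k, hk, hj, hne⟩
  · simp at hacc
  · exact ⟨k, hk, by omega, hne⟩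

theorem sum_set_lt (l : List (List Int)) (k : Nat) (hk : k < l.length) (hne : l[k] ≠ []) :
    ((l.set k (l[k].drop 1)).map List.length).sum < (l.map List.length).sum := by
  induction l generalizing k with
  | nil => simp at hk
  | cons hd tl ih =>
    cases k with
    | zero =>
      simp only [List.getElem_cons_zero] at hne ⊢
      simp only [List.set_cons_zero, List.map_cons, List.sum_cons, List.length_drop]
      have : 0 < hd.length := List.length_pos_iff.mpr hne
      omega
    | succ k =>
      simp only [List.getElem_cons_succ] at hne ⊢
      simp only [List.set_cons_succ, List.map_cons, List.sum_cons]
      have := ih k (by simpa using hk) hne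
      omega

-- B's while-loop; 'heads[j] = heads[j][1:]' is the set/drop below (start 1 ≥ 0, so [1:] = drop 1)
def bLoop (heads : List (List Int)) (total day : Int) : Int :=
  match hsb : scanBest heads with
  | none => total
  | some (v, j) =>
    bLoop (heads.set j.toNat ((PySem.List.pyGetD heads j []).drop 1))
      (total + v * (day + 1)) (day + 1)
termination_by (heads.map List.length).sum
decreasing_by
  obtain ⟨k, hk, rfl, hne⟩ := scanBest_some hsb
  rw [Int.toNat_natCast, PySem.List.pyGetD_natCast, List.getD_eq_getElem heads [] hk]
  exact sum_set_lt heads k hk hne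

-- 'row[::-1]' ported as List.reverse
def maxSpending_alt (values : List (List Int)) : Int :=
  bLoop (values.map (fun row => row.reverse)) 0 0

-- ===== PRECONDITION & SPEC =====
-- Pre_ excludes exactly the inputs containing an empty shop row, on which A raises
-- IndexError at row[-1]; A returns normally on every other input.
def Pre_maxSpending (values : List (List Int)) : Prop := ∀ row ∈ values, row ≠ []
instance (values : List (List Int)) : Decidable (Pre_maxSpending values) := by
  unfold Pre_maxSpending; infer_instance

def pvWitness_maxSpending : List (List Int) := [[8, 5, 2], [1, 6, 4], [9, 9, 3]]

def Spec_maxSpending (values : List (List Int)) (out : Int) : Prop := out = maxSpending_alt values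
instance (values : List (List Int)) (out : Int) : Decidable (Spec_maxSpending values out) := by
  unfold Spec_maxSpending; infer_instance

-- ===== CLAIM (what is proved, stated in full; the proofs are below) =====
def Claim_equal_maxSpending : Prop := ∀ (values : List (List Int)), Dom_maxSpending values →
  Pre_maxSpending values → Spec_maxSpending values (maxSpending values)

-- ===== LEMMAS AND PROOFS =====

-- abstract state: rem k = number of items still unsold in shop k.
-- mkpq: the heap contents A maintains (one triple per shop with items left), shops numbered from j.
def mkpq : List (List Int) → List Nat → Int → List (Int × Int × Int)
  | row :: vs, L :: Ls, j =>
      (if 0 < L then [(row.getD (L - 1) 0, j, (L : Int) - 1)] else []) ++ mkpq vs Ls (j + 1)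
  | _, _, _ => []

-- the multiset of items still unsold (each shop's first rem k items)
def remFlat : List (List Int) → List Nat → List Int
  | row :: vs, L :: Ls => row.take L ++ remFlat vs Ls
  | _, _ => []

-- mkheads: B's frontier state (each shop's remaining items, cheapest-candidate first)
def mkheads : List (List Int) → List Nat → List (List Int)
  | row :: vs, L :: Ls => (row.take L).reverse :: mkheads vs Ls
  | _, _ => []

-- the abstract minimum-search over mkpq entries that B's scan computes
def gstep (acc : Option (Int × Int)) (t : Int × Int × Int) : Option (Int × Int) :=
  match acc with
  | none => some (t.1, t.2.1)
  | some (bv, bj) => if t.1 < bv then some (t.1, t.2.1) else some (bv, bj)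

theorem lexLt_iff (a b : Int × Int × Int) :
    lexLt a b = true ↔
      (a.1 < b.1 ∨ (a.1 = b.1 ∧ (a.2.1 < b.2.1 ∨ (a.2.1 = b.2.1 ∧ a.2.2 < b.2.2)))) := by
  simp [lexLt]

theorem lexLt_false_fst {a b : Int × Int × Int} (h : lexLt a b = false) : b.1 ≤ a.1 := by
  rw [← Bool.not_eq_true, lexLt_iff] at h; omega

theorem lexLt_false_of_fst_lt {a b : Int × Int × Int} (h : b.1 < a.1) : lexLt a b = false := by
  rw [← Bool.not_eq_true] at *; rw [lexLt_iff]; omega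

theorem lexLt_irrefl (a : Int × Int × Int) : lexLt a a = false := by
  rw [← Bool.not_eq_true, lexLt_iff]; omega

theorem lexLt_trans {a b c : Int × Int × Int}
    (h1 : lexLt a b = true) (h2 : lexLt b c = true) : lexLt a c = true := by
  rw [lexLt_iff] at *; omega

theorem lexLt_neg_lt {a b c : Int × Int × Int}
    (h1 : lexLt a b = false) (h2 : lexLt a c = true) : lexLt b c = true := by
  rw [← Bool.not_eq_true, lexLt_iff] at h1
  rw [lexLt_iff] at *; omega

-- what heapMin satisfies: nothing in the list is lexicographically smaller
theorem heapMin_not_lt (x : Int × Int × Int) (xs : List (Int × Int × Int)) :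
    ∀ y ∈ x :: xs, lexLt y (heapMin x xs) = false := by
  unfold heapMin
  induction xs generalizing x with
  | nil =>
    intro y hy
    rw [List.mem_singleton] at hy
    subst hy
    exact lexLt_irrefl y
  | cons z t ih =>
    intro y hy
    simp only [List.foldl_cons]
    have hkept := ih (if lexLt z x then z else x) _ (List.mem_cons_self ..)
    have hdisc : ∀ d, d = x ∨ d = z →
        lexLt d (t.foldl (fun m t => if lexLt t m = true then t else m)
          (if lexLt z x = true then z else x)) = false := by
      intro d hd
      by_cases hc : lexLt z x = true
      · simp only [hc, if_true] at hkept ⊢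
        rcases hd with rfl | rfl
        · by_contra hlt
          rw [Bool.not_eq_false] at hlt
          exact absurd (lexLt_trans hc hlt) (by simp [hkept])
        · exact hkept
      · rw [Bool.not_eq_true] at hc
        simp only [hc, Bool.false_eq_true, if_false] at hkept ⊢
        rcases hd with rfl | rfl
        · exact hkept
        · by_contra hlt
          rw [Bool.not_eq_false] at hlt
          exact absurd (lexLt_neg_lt hc hlt) (by simp [hkept])
    rw [List.mem_cons, List.mem_cons] at hy
    rcases hy with rfl | rfl | hy
    · exact hdisc y (Or.inl rfl)
    · exact hdisc y (Or.inr rfl)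
    · exact ih (if lexLt z x then z else x) _ (List.mem_cons_of_mem _ hy)

-- two elements that are both lexicographic minima are equal
theorem min_unique {l : List (Int × Int × Int)} {t1 t2 : Int × Int × Int}
    (h1 : ∀ y ∈ l, lexLt y t1 = false) (h2 : ∀ y ∈ l, lexLt y t2 = false)
    (hm1 : t1 ∈ l) (hm2 : t2 ∈ l) : t1 = t2 := by
  have ha := h2 t1 hm1
  have hb := h1 t2 hm2
  rw [← Bool.not_eq_true, lexLt_iff] at ha hb
  rcases t1 with ⟨a, b, c⟩
  rcases t2 with ⟨d, e, f⟩
  dsimp only at ha hb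
  simp only [Prod.mk.injEq]
  omega

-- membership in mkpq, elimination form
theorem mkpq_mem_elim {vals : List (List Int)} {rem : List Nat} {j : Int} {t : Int × Int × Int}
    (hlen : rem.length = vals.length) (ht : t ∈ mkpq vals rem j) :
    ∃ (k : Nat) (hk : k < rem.length) (hkv : k < vals.length), 0 < rem[k] ∧
      t = ((vals[k]).getD (rem[k] - 1) 0, j + (k : Int), ((rem[k] : Nat) : Int) - 1) := by
  induction vals generalizing rem j with
  | nil => simp at hlen; subst hlen; simp [mkpq] at ht
  | cons row vs ih =>
    cases rem with
    | nil => simp [mkpq] at ht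
    | cons L Ls =>
      simp only [mkpq, List.mem_append] at ht
      rcases ht with ht | ht
      · by_cases hL : 0 < L
        · simp only [hL, if_true, List.mem_singleton] at ht
          exact ⟨0, by simp, by simp, by simpa using hL, by simpa using ht⟩
        · simp [hL] at ht
      · have hlen' : Ls.length = vs.length := by simpa using hlen
        obtain ⟨k, hk, hkv, hpos, rfl⟩ := ih hlen' ht
        refine ⟨k + 1, by simpa using hk, by simpa using hkv, by simpa using hpos, ?_⟩
        simp only [List.getElem_cons_succ]
        rw [show j + ((k + 1 : Nat) : Int) = (j + 1) + (k : Int) by push_cast; ring]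

-- shop indices in mkpq start at j
theorem mkpq_shop_ge {vals : List (List Int)} {rem : List Nat} {j : Int} :
    ∀ t ∈ mkpq vals rem j, j ≤ t.2.1 := by
  induction vals generalizing rem j with
  | nil => cases rem <;> simp [mkpq]
  | cons row vs ih =>
    cases rem with
    | nil => simp [mkpq]
    | cons L Ls =>
      intro t ht
      simp only [mkpq, List.mem_append] at ht
      rcases ht with ht | ht
      · by_cases hL : 0 < L
        · simp only [hL, if_true, List.mem_singleton] at ht
          subst ht
          exact le_refl _
        · simp [hL] at ht
      · have := ih t ht
        omega

-- shop indices in mkpq are strictly increasing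
theorem mkpq_shops_pairwise {vals : List (List Int)} {rem : List Nat} {j : Int} :
    (mkpq vals rem j).Pairwise (fun a b => a.2.1 < b.2.1) := by
  induction vals generalizing rem j with
  | nil => cases rem <;> simp [mkpq]
  | cons row vs ih =>
    cases rem with
    | nil => simp [mkpq]
    | cons L Ls =>
      simp only [mkpq]
      rw [List.pairwise_append]
      refine ⟨?_, ih, ?_⟩
      · by_cases hL : 0 < L <;> simp [hL]
      · intro a ha b hb
        by_cases hL : 0 < L
        · simp only [hL, if_true, List.mem_singleton] at ha
          subst ha
          have := mkpq_shop_ge b hb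
          simp only
          omega
        · simp [hL] at ha

-- an empty heap means nothing is left to sell
theorem mkpq_eq_nil_remFlat {vals : List (List Int)} {rem : List Nat} {j : Int}
    (h : mkpq vals rem j = []) : remFlat vals rem = [] := by
  induction vals generalizing rem j with
  | nil => cases rem <;> simp [remFlat]
  | cons row vs ih =>
    cases rem with
    | nil => simp [remFlat]
    | cons L Ls =>
      simp only [mkpq, List.append_eq_nil_iff] at h
      have hL : ¬ 0 < L := by
        intro hL; simp [hL] at h
      simp only [remFlat, List.append_eq_nil_iff]
      exact ⟨by simp [Nat.eq_zero_of_not_pos hL], ih h.2⟩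

-- nothing left to sell means an empty heap
theorem remFlat_nil_mkpq {vals : List (List Int)} {rem : List Nat} (j : Int)
    (hle : ∀ (k : Nat) (hk : k < rem.length) (hkv : k < vals.length), rem[k] ≤ (vals[k]).length)
    (h : remFlat vals rem = []) : mkpq vals rem j = [] := by
  induction vals generalizing rem j with
  | nil => cases rem <;> simp [mkpq]
  | cons row vs ih =>
    cases rem with
    | nil => simp [mkpq]
    | cons L Ls =>
      simp only [remFlat, List.append_eq_nil_iff] at h
      have hL0 : L = 0 := by
        have hle0 := hle 0 (by simp) (by simp)
        simp only [List.getElem_cons_zero] at hle0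
        rcases Nat.eq_zero_or_pos L with h0 | hpos
        · exact h0
        · exfalso
          have hlen : (row.take L).length = L := by rw [List.length_take]; omega
          have : row.take L ≠ [] := by
            intro hnil
            rw [hnil] at hlen
            simp at hlen
            omega
          exact this h.1
      subst hL0
      simp only [mkpq, lt_irrefl, if_false, List.nil_append]
      exact ih (j + 1)
        (fun k hk hkv => by
          have := hle (k + 1) (by simpa using hk) (by simpa using hkv)
          simpa using this) h.2

-- one pop + one re-feed, on the abstract state: erase the popped triple, append the next
theorem mkpq_erase_set (vals : List (List Int)) (rem : List Nat) (j : Int) (k : Nat)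
    (hk : k < rem.length) (hkv : k < vals.length) (hpos : 0 < rem[k]) :
    ((mkpq vals rem j).erase ((vals[k]).getD (rem[k] - 1) 0, j + (k : Int), ((rem[k] : Nat) : Int) - 1)
        ++ (if 1 < rem[k] then
              [((vals[k]).getD (rem[k] - 2) 0, j + (k : Int), ((rem[k] : Nat) : Int) - 2)]
            else [])).Perm
      (mkpq vals (rem.set k (rem[k] - 1)) j) := by
  induction k generalizing vals rem j with
  | zero =>
    cases vals with
    | nil => simp at hkv
    | cons row vs =>
      cases rem with
      | nil => simp at hk
      | cons L Ls =>
        simp only [List.getElem_cons_zero] at hpos ⊢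
        simp only [Nat.cast_zero, add_zero, List.set_cons_zero]
        simp only [mkpq, hpos, if_true, List.singleton_append, List.erase_cons_head]
        by_cases hb : 1 < L
        · have h1 : 0 < L - 1 := by omega
          simp only [hb, if_true, h1]
          have h2 : L - 1 - 1 = L - 2 := by omega
          have h3 : ((L - 1 : Nat) : Int) - 1 = (L : Int) - 2 := by omega
          rw [h2, h3]
          exact List.perm_append_comm
        · have h1 : ¬ 0 < L - 1 := by omega
          simp [hb, h1]
  | succ k ih =>
    cases vals with
    | nil => simp at hkv
    | cons row vs =>
      cases rem with
      | nil => simp at hk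
      | cons L Ls =>
        simp only [List.getElem_cons_succ] at hpos ⊢
        have hk' : k < Ls.length := by simpa using hk
        have hkv' : k < vs.length := by simpa using hkv
        have hcast : j + ((k + 1 : Nat) : Int) = (j + 1) + (k : Int) := by push_cast; ring
        rw [hcast]
        simp only [mkpq, List.set_cons_succ]
        have hnot : ((vs[k]).getD (Ls[k] - 1) 0, (j + 1) + (k : Int), ((Ls[k] : Nat) : Int) - 1)
            ∉ (if 0 < L then [(row.getD (L - 1) 0, j, (L : Int) - 1)] else []) := by
          by_cases hL : 0 < L
          · simp only [hL, if_true, List.mem_singleton]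
            intro hEq
            rw [Prod.mk.injEq, Prod.mk.injEq] at hEq
            omega
          · simp [hL]
        rw [List.erase_append_right _ hnot, List.append_assoc]
        exact List.Perm.append_left _ (ih vs Ls (j + 1) hk' hkv' hpos)

-- selling one item removes exactly its value from the unsold multiset
theorem remFlat_set (vals : List (List Int)) (rem : List Nat) (k : Nat)
    (hk : k < rem.length) (hkv : k < vals.length) (hpos : 0 < rem[k])
    (hle : rem[k] ≤ (vals[k]).length) :
    (remFlat vals rem).Perm ((vals[k]).getD (rem[k] - 1) 0 :: remFlat vals (rem.set k (rem[k] - 1))) := by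
  induction k generalizing vals rem with
  | zero =>
    cases vals with
    | nil => simp at hkv
    | cons row vs =>
      cases rem with
      | nil => simp at hk
      | cons L Ls =>
        simp only [List.getElem_cons_zero] at hpos hle ⊢
        simp only [List.set_cons_zero, remFlat]
        obtain ⟨P, rfl⟩ : ∃ P, L = P + 1 := ⟨L - 1, by omega⟩
        simp only [Nat.add_sub_cancel]
        have hL1 : P < row.length := by omega
        rw [List.take_succ_eq_append_getElem hL1, List.getD_eq_getElem row 0 hL1,
          List.append_assoc, List.singleton_append]
        exact List.perm_middle
  | succ k ih =>
    cases vals with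
    | nil => simp at hkv
    | cons row vs =>
      cases rem with
      | nil => simp at hk
      | cons L Ls =>
        simp only [List.getElem_cons_succ] at hpos hle ⊢
        simp only [List.set_cons_succ, remFlat]
        have := ih vs Ls (by simpa using hk) (by simpa using hkv) hpos hle
        exact (List.Perm.append_left _ this).trans List.perm_middle

-- the front of a reversed prefix is the prefix's last element
theorem take_reverse_cons (row : List Int) (L : Nat) (h0 : 0 < L) (hle : L ≤ row.length) :
    (row.take L).reverse = row.getD (L - 1) 0 :: (row.take (L - 1)).reverse := by
  obtain ⟨P, rfl⟩ : ∃ P, L = P + 1 := ⟨L - 1, by omega⟩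
  simp only [Nat.add_sub_cancel]
  have hL1 : P < row.length := by omega
  rw [List.take_succ_eq_append_getElem hL1, List.getD_eq_getElem row 0 hL1, List.reverse_append]
  simp

theorem mkheads_len {vals : List (List Int)} {rem : List Nat} (hlen : rem.length = vals.length) :
    (mkheads vals rem).length = vals.length := by
  induction vals generalizing rem with
  | nil => cases rem <;> simp [mkheads]
  | cons row vs ih =>
    cases rem with
    | nil => simp at hlen
    | cons L Ls => simpa [mkheads] using ih (by simpa using hlen)

theorem mkheads_getElem {vals : List (List Int)} {rem : List Nat} {k : Nat}
    (hk : k < rem.length) (hkv : k < vals.length)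
    (hh : k < (mkheads vals rem).length) :
    (mkheads vals rem)[k] = ((vals[k]).take rem[k]).reverse := by
  induction k generalizing vals rem with
  | zero =>
    cases vals with
    | nil => simp at hkv
    | cons row vs =>
      cases rem with
      | nil => simp at hk
      | cons L Ls => simp [mkheads]
  | succ k ih =>
    cases vals with
    | nil => simp at hkv
    | cons row vs =>
      cases rem with
      | nil => simp at hk
      | cons L Ls =>
        simp only [mkheads, List.getElem_cons_succ]
        exact ih (by simpa using hk) (by simpa using hkv) (by simpa [mkheads] using hh)

theorem mkheads_set {vals : List (List Int)} {rem : List Nat} {k : Nat} (a : Nat)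
    (hk : k < rem.length) (hkv : k < vals.length) :
    mkheads vals (rem.set k a) = (mkheads vals rem).set k (((vals[k]).take a).reverse) := by
  induction k generalizing vals rem with
  | zero =>
    cases vals with
    | nil => simp at hkv
    | cons row vs =>
      cases rem with
      | nil => simp at hk
      | cons L Ls => simp [mkheads]
  | succ k ih =>
    cases vals with
    | nil => simp at hkv
    | cons row vs =>
      cases rem with
      | nil => simp at hk
      | cons L Ls =>
        simp only [List.set_cons_succ, mkheads, List.getElem_cons_succ, List.cons.injEq]
        exact ⟨trivial, ih (by simpa using hk) (by simpa using hkv)⟩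

theorem mkheads_full (vals : List (List Int)) :
    mkheads vals (vals.map List.length) = vals.map (fun row => row.reverse) := by
  induction vals with
  | nil => simp [mkheads]
  | cons row vs ih => simp [mkheads, List.take_length, ih]

-- B's scan over the frontier computes the abstract minimum-search over the heap contents
theorem scan_eq_gfold (vals : List (List Int)) : ∀ (rem : List Nat) (j0 : Int)
    (acc : Option (Int × Int)),
    rem.length = vals.length →
    (∀ (k : Nat) (hk : k < rem.length) (hkv : k < vals.length), rem[k] ≤ (vals[k]).length) →
    (PySem.List.enumerate (mkheads vals rem) j0).foldl bstep acc
      = (mkpq vals rem j0).foldl gstep acc := by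
  induction vals with
  | nil =>
    intro rem j0 acc hlen _
    cases rem with
    | nil => simp [mkheads, mkpq]
    | cons L Ls => simp at hlen
  | cons row vs ih =>
    intro rem j0 acc hlen hle
    cases rem with
    | nil => simp at hlen
    | cons L Ls =>
      have hle0 : L ≤ row.length := by simpa using hle 0 (by simp) (by simp)
      have hrec : ∀ acc', (PySem.List.enumerate (mkheads vs Ls) (j0 + 1)).foldl bstep acc'
          = (mkpq vs Ls (j0 + 1)).foldl gstep acc' := fun acc' =>
        ih Ls (j0 + 1) acc' (by simpa using hlen)
          (fun k hk hkv => by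
            have := hle (k + 1) (by simpa using hk) (by simpa using hkv)
            simpa using this)
      by_cases hL : 0 < L
      · simp only [mkheads, mkpq, hL, if_true, List.singleton_append]
        rw [take_reverse_cons row L hL hle0]
        simp only [PySem.List.enumerate, List.foldl_cons]
        rw [hrec _]
        congr 1
        rcases acc with _ | ⟨bv, bj⟩ <;> rfl
      · have hL0 : L = 0 := by omega
        subst hL0
        simp only [mkheads, mkpq, lt_irrefl, if_false, PySem.List.enumerate, List.foldl_cons,
          List.take_zero, List.reverse_nil, List.nil_append]
        rw [hrec _]
        rfl

-- the abstract minimum-search never loses a found candidate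
theorem gfold_ne_none (l : List (Int × Int × Int)) (h : l.foldl gstep none = none) : l = [] := by
  induction l using List.reverseRecOn with
  | nil => rfl
  | append_singleton l u _ =>
    exfalso
    rw [List.foldl_append, List.foldl_cons, List.foldl_nil] at h
    rcases hfold : l.foldl gstep none with _ | b
    · rw [hfold] at h
      simp [gstep] at h
    · rcases b with ⟨bv, bj⟩
      rw [hfold] at h
      simp only [gstep] at h
      split_ifs at h

-- the abstract minimum-search finds the lexicographic minimum (first shop on ties)
theorem gfold_some (l : List (Int × Int × Int)) :
    l.Pairwise (fun a b => a.2.1 < b.2.1) → ∀ (v j : Int),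
    l.foldl gstep none = some (v, j) →
    ∃ t ∈ l, t.1 = v ∧ t.2.1 = j ∧ ∀ y ∈ l, lexLt y t = false := by
  induction l using List.reverseRecOn with
  | nil => intro _ v j h; simp at h
  | append_singleton l u ih =>
    intro hpair v j h
    rw [List.pairwise_append] at hpair
    have hl : l.Pairwise (fun a b => a.2.1 < b.2.1) := hpair.1
    have hcross : ∀ a ∈ l, a.2.1 < u.2.1 := by
      intro a ha
      exact hpair.2.2 a ha u (by simp)
    rw [List.foldl_append, List.foldl_cons, List.foldl_nil] at h
    rcases hfold : l.foldl gstep none with _ | b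
    · have hlnil : l = [] := gfold_ne_none l hfold
      subst hlnil
      rw [hfold] at h
      simp only [gstep, Option.some.injEq, Prod.mk.injEq] at h
      refine ⟨u, by simp, h.1, h.2, ?_⟩
      intro y hy
      simp only [List.nil_append, List.mem_singleton] at hy
      subst hy
      exact lexLt_irrefl y
    · rcases b with ⟨bv, bj⟩
      rw [hfold] at h
      obtain ⟨t0, ht0, ht0v, ht0j, ht0min⟩ := ih hl bv bj hfold
      simp only [gstep] at h
      split_ifs at h with hlt
      · simp only [Option.some.injEq, Prod.mk.injEq] at h
        refine ⟨u, by simp, h.1, h.2, ?_⟩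
        intro y hy
        rw [List.mem_append, List.mem_singleton] at hy
        rcases hy with hy | rfl
        · have : bv ≤ y.1 := by
            have := lexLt_false_fst (ht0min y hy)
            omega
          exact lexLt_false_of_fst_lt (by omega)
        · exact lexLt_irrefl y
      · simp only [Option.some.injEq, Prod.mk.injEq] at h
        refine ⟨t0, List.mem_append_left _ ht0, by omega, by omega, ?_⟩
        intro y hy
        rw [List.mem_append, List.mem_singleton] at hy
        rcases hy with hy | rfl
        · exact ht0min y hy
        · have hshop : t0.2.1 < y.2.1 := hcross t0 ht0
          rw [← Bool.not_eq_true, lexLt_iff]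
          omega

-- row[-1] on a nonempty row is its last element
theorem pyGetD_neg_one (row : List Int) (h : row ≠ []) :
    PySem.List.pyGetD row (-1) 0 = row.getD (row.length - 1) 0 := by
  cases row with
  | nil => simp at h
  | cons a t => simp [PySem.List.pyGetD, PySem.List.pyGet?, PySem.List.pyIdx?]

-- A's initial heap is mkpq at the all-items state
theorem init_pq (vals : List (List Int)) (hne : ∀ row ∈ vals, row ≠ []) : ∀ (j : Int),
    (PySem.List.enumerate vals j).map
        (fun p => (PySem.List.pyGetD p.2 (-1) 0, p.1, (p.2.length : Int) - 1))
      = mkpq vals (vals.map List.length) j := by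
  induction vals with
  | nil => intro j; simp [PySem.List.enumerate, mkpq]
  | cons row vs ih =>
    intro j
    have hrow : row ≠ [] := hne row (by simp)
    have hpos : 0 < row.length := List.length_pos_iff.mpr hrow
    simp only [PySem.List.enumerate, List.map_cons, List.map, mkpq, hpos, if_true]
    rw [pyGetD_neg_one row hrow]
    simp only [List.singleton_append, List.cons.injEq]
    exact ⟨by simp, ih (fun r hr => hne r (by simp [hr])) (j + 1)⟩

-- the main bisimulation: A's heap loop and B's scan loop return the same total
theorem loops_eq (values : List (List Int)) :
    ∀ (n : Nat) (rem : List Nat) (pq : List (Int × Int × Int)) (total day : Int),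
      (remFlat values rem).length = n →
      rem.length = values.length →
      (∀ (k : Nat) (hk : k < rem.length) (hkv : k < values.length), rem[k] ≤ (values[k]).length) →
      pq.Perm (mkpq values rem 0) →
      aLoop values pq total day = bLoop (mkheads values rem) total day := by
  intro n
  induction n using Nat.strong_induction_on with
  | _ n ih =>
    intro rem pq total day hn hlen hle hperm
    have hscan_eq := scan_eq_gfold values rem 0 none hlen hle
    by_cases hemp : remFlat values rem = []
    · have hmk : mkpq values rem 0 = [] := remFlat_nil_mkpq 0 hle hemp
      rw [hmk] at hperm
      have hpq : pq = [] := List.Perm.eq_nil hperm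
      subst hpq
      have hsb : scanBest (mkheads values rem) = none := by
        rw [scanBest, hscan_eq, hmk, List.foldl_nil]
      rw [aLoop, bLoop]
      split
      · rfl
      · next v j heq => rw [hsb] at heq; exact absurd heq (by simp)
    · have hpqne : pq ≠ [] := by
        intro h
        subst h
        exact hemp (mkpq_eq_nil_remFlat (List.Perm.nil_eq hperm).symm)
      obtain ⟨x, rest, rfl⟩ := List.exists_cons_of_ne_nil hpqne
      set m := heapMin x rest with hm
      have hmem : m ∈ x :: rest := heapMin_mem x rest
      have hmemq : m ∈ mkpq values rem 0 := (hperm.mem_iff).mp hmem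
      obtain ⟨k, hk, hkv, hkpos, hmEq⟩ := mkpq_mem_elim hlen hmemq
      simp only [zero_add] at hmEq
      set L := rem[k] with hLdef
      set v := (values[k]).getD (L - 1) 0 with hv
      have hm1 : m.1 = v := by rw [hmEq]
      have hm21 : m.2.1 = (k : Int) := by rw [hmEq]
      have hm22 : m.2.2 = ((L : Nat) : Int) - 1 := by rw [hmEq]
      have hnotlt : ∀ y ∈ mkpq values rem 0, lexLt y m = false := by
        intro y hy
        exact heapMin_not_lt x rest y (hperm.mem_iff.mpr hy)
      -- B's scan finds exactly the triple A pops
      have hsb : scanBest (mkheads values rem) = some (v, (k : Int)) := by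
        rw [scanBest, hscan_eq]
        rcases hG : (mkpq values rem 0).foldl gstep none with _ | p
        · exact absurd (gfold_ne_none _ hG) (by intro h; rw [h] at hmemq; simp at hmemq)
        · rcases p with ⟨v0, j0⟩
          obtain ⟨t, htmem, htv, htj, htmin⟩ := gfold_some _ mkpq_shops_pairwise v0 j0 hG
          have : t = m := min_unique htmin hnotlt htmem hmemq
          subst this
          rw [hm1, hm21] at *
          rw [← htv, ← htj]
      -- state after one day
      have hmkne : k < (mkheads values rem).length := by rw [mkheads_len hlen]; omega
      set rem' := rem.set k (L - 1) with hrem'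
      have hbstate : (mkheads values rem).set (k : Int).toNat
            ((PySem.List.pyGetD (mkheads values rem) (k : Int) []).drop 1)
          = mkheads values rem' := by
        rw [Int.toNat_natCast, PySem.List.pyGetD_natCast,
          List.getD_eq_getElem (mkheads values rem) [] hmkne,
          mkheads_getElem hk hkv hmkne, take_reverse_cons _ _ hkpos (hle k hk hkv)]
        rw [hrem', mkheads_set (L - 1) hk hkv]
        simp
      have hremperm := remFlat_set values rem k hk hkv hkpos (hle k hk hkv)
      rw [← hLdef, ← hv, ← hrem'] at hremperm
      have hlen' : rem'.length = values.length := by simp [hrem', hlen]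
      have hle' : ∀ (k' : Nat) (h1 : k' < rem'.length) (h2 : k' < values.length),
          rem'[k'] ≤ (values[k']).length := by
        intro k' h1 h2
        simp only [hrem', List.getElem_set]
        split_ifs with hkk
        · subst hkk
          have := hle k hk hkv
          omega
        · exact hle k' (by simpa [hrem'] using h1) h2
      have hnpos : 0 < n := by
        rw [← hn]
        exact List.length_pos_iff.mpr hemp
      have hflat' : (remFlat values rem').length = n - 1 := by
        have hl := hremperm.length_eq
        simp only [List.length_cons] at hl
        omega
      have herase := mkpq_erase_set values rem 0 k hk hkv hkpos
      simp only [zero_add, ← hLdef, ← hv, ← hrem'] at herase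
      -- unfold B one step
      rw [bLoop]
      split
      · next heq => rw [hsb] at heq; exact absurd heq (by simp)
      · next v' j' heq =>
        rw [hsb] at heq
        simp only [Option.some.injEq, Prod.mk.injEq] at heq
        obtain ⟨rfl, rfl⟩ := heq
        rw [hbstate]
        -- unfold A one step
        rw [aLoop]
        by_cases hb : 1 < L
        · rw [dif_pos (show m.2.2 > 0 by rw [hm22]; omega)]
          rw [if_pos hb] at herase
          have hpush : (PySem.List.pyGetD (PySem.List.pyGetD values m.2.1 []) (m.2.2 - 1) 0,
                m.2.1, m.2.2 - 1)
              = ((values[k]).getD (L - 2) 0, (k : Int), ((L : Nat) : Int) - 2) := by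
            rw [hm21, hm22]
            rw [PySem.List.pyGetD_natCast values k [], List.getD_eq_getElem values [] hkv]
            rw [show ((L : Nat) : Int) - 1 - 1 = ((L - 2 : Nat) : Int) by omega]
            rw [PySem.List.pyGetD_natCast]
            simp only [Prod.mk.injEq]
            exact ⟨trivial, trivial, by omega⟩
          rw [hpush]
          have hperm' : (((x :: rest).erase m) ++
                [((values[k]).getD (L - 2) 0, (k : Int), ((L : Nat) : Int) - 2)]).Perm
              (mkpq values rem' 0) := by
            refine (List.Perm.append (hperm.erase m) (List.Perm.refl _)).trans ?_
            rw [hmEq]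
            exact herase
          rw [ih (n - 1) (by omega) rem' _ _ _ hflat' hlen' hle' hperm']
          rw [hm1]
        · rw [dif_neg (show ¬ m.2.2 > 0 by rw [hm22]; omega)]
          rw [if_neg hb] at herase
          rw [List.append_nil] at herase
          have hperm' : ((x :: rest).erase m).Perm (mkpq values rem' 0) := by
            refine (hperm.erase m).trans ?_
            rw [hmEq]
            exact herase
          rw [ih (n - 1) (by omega) rem' _ _ _ hflat' hlen' hle' hperm']
          rw [hm1]

-- ===== VERDICT (by name: the statement is the Claim_ definition above) =====
theorem maxSpending_spec : Claim_equal_maxSpending := by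
  intro values _hdom hpre
  unfold Spec_maxSpending maxSpending maxSpending_alt
  rw [init_pq values hpre 0]
  rw [loops_eq values (remFlat values (values.map List.length)).length
      (values.map List.length) _ 0 0 rfl (by simp)
      (by intro k hk hkv; simp) (List.Perm.refl _)]
  rw [mkheads_full]
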